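-- pv_equiv track=rewrite | github.com/hiteshsonawane007/java-resources | DETest_Sonawane/PandasApproach/ProcessPRNFile.py | splitEachRow
-- ===== SOURCE A (Python) =====
-- def splitEachRow(line, partitionList):
--     lineparts = []
--     start = 0
--     end = 0
--
--     for partition in partitionList:
--         start = end
--         end = start + partition
--         columndata = line[start:end]
--         lineparts.append(columndata)
--     return lineparts
-- ===== SOURCE B (Python) =====
-- def splitEachRow(line, partitionList):
--     # divide and conquer: split the partition list in half, handle each half
--     # recursively, offsetting the right half by the sum of the left half
--     def go(offset, parts):
--         if not parts:
--             return []
--         if len(parts) == 1: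
--             return [line[offset:offset + parts[0]]]
--         mid = len(parts) // 2
--         left = parts[:mid]
--         right = parts[mid:]
--         return go(offset, left) + go(offset + sum(left), right)
--     return go(0, partitionList)
-- ===== Notes on version B (the rewrite author's own statement) =====
-- stated objective: alternative
-- what changed: B replaces A's linear running-offset loop with a divide-and-conquer recursion: it splits the partition list in half, handles each half recursively, and offsets the right half by the sum of the left half.
import Mathlib
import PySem

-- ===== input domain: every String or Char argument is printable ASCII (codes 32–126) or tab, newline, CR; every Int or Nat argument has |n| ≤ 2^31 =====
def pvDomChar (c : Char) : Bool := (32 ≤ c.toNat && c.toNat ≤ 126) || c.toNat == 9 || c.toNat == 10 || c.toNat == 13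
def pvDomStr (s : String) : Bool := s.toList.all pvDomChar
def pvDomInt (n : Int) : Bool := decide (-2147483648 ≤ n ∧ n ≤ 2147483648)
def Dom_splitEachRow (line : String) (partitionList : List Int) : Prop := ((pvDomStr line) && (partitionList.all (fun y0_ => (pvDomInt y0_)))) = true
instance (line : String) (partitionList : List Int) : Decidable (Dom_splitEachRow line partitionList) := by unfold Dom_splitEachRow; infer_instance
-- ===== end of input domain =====

-- B splits the partition list recursively in half (divide and conquer, right half
-- offset by the left half's sum) instead of A's linear running-offset loop
-- (alternative decomposition, same cost).


-- ===== PORT A =====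
-- running-offset loop: state is (end, lineparts); start := previous end each step
def splitEachRow (line : String) (partitionList : List Int) : List String :=
  (partitionList.foldl
    (fun (st : Int × List String) partition =>
      let start := st.1
      let e := start + partition
      (e, st.2 ++ [PySem.Str.slice line (some start) (some e)]))
    (0, [])).2

-- ===== PORT B =====
-- divide and conquer: base cases [] and [p]; otherwise split the list at mid
-- (parts[:mid] / parts[mid:] with 0 ≤ mid ≤ len are exactly take/drop) and
-- offset the right half by sum(left)
def pvGoB (line : String) (offset : Int) (parts : List Int) : List String :=
  match parts with
  | [] => []
  | [p] => [PySem.Str.slice line (some offset) (some (offset + p))]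
  | p :: q :: rest =>
    let parts := p :: q :: rest
    let mid := parts.length / 2
    let left := parts.take mid
    let right := parts.drop mid
    pvGoB line offset left ++ pvGoB line (offset + left.sum) right
termination_by parts.length
decreasing_by
  all_goals simp only [List.length_take, List.length_drop, List.length_cons]
  all_goals omega

def splitEachRow_alt (line : String) (partitionList : List Int) : List String :=
  pvGoB line 0 partitionList

-- ===== PRECONDITION & SPEC =====
def Spec_splitEachRow (line : String) (partitionList : List Int) (out : List String) : Prop := out = splitEachRow_alt line partitionList
instance (line : String) (partitionList : List Int) (out : List String) : Decidable (Spec_splitEachRow line partitionList out) := by unfold Spec_splitEachRow; infer_instance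

-- ===== CLAIM (what is proved, stated in full; the proofs are below) =====
def Claim_equal_splitEachRow : Prop := ∀ (line : String) (partitionList : List Int), Dom_splitEachRow line partitionList → Spec_splitEachRow line partitionList (splitEachRow line partitionList)

-- ===== LEMMAS AND PROOFS =====

/-- Linear reference: the slices taken left to right starting at offset `e`. -/
def pvLin (line : String) (e : Int) : List Int → List String
  | [] => []
  | p :: ps => PySem.Str.slice line (some e) (some (e + p)) :: pvLin line (e + p) ps

theorem pvLin_append (line : String) (l r : List Int) (e : Int) :
    pvLin line e (l ++ r) = pvLin line e l ++ pvLin line (e + l.sum) r := by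
  induction l generalizing e with
  | nil => simp [pvLin]
  | cons p ps ih =>
    simp only [List.cons_append, pvLin, List.sum_cons, ih, List.cons_append]
    ring_nf

theorem pvGoB_eq_lin (line : String) (e : Int) (parts : List Int) :
    pvGoB line e parts = pvLin line e parts := by
  fun_induction pvGoB line e parts with
  | case1 => simp [pvLin]
  | case2 => simp [pvLin]
  | case3 e p q rest parts mid left right ih1 ih2 =>
    rw [ih1, ih2]
    have h : (p :: q :: rest : List Int) = left ++ right :=
      (List.take_append_drop mid (p :: q :: rest)).symm
    conv_rhs => rw [h, pvLin_append]

theorem foldlA_eq (line : String) (pl : List Int) (e : Int) (acc : List String) :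
    (pl.foldl
      (fun (st : Int × List String) partition =>
        let start := st.1
        let en := start + partition
        (en, st.2 ++ [PySem.Str.slice line (some start) (some en)]))
      (e, acc)).2 = acc ++ pvLin line e pl := by
  induction pl generalizing e acc with
  | nil => simp [pvLin]
  | cons p ps ih => simp [pvLin, ih]

-- ===== VERDICT (by name: the statement is the Claim_ definition above) =====
theorem splitEachRow_spec : Claim_equal_splitEachRow := by
  intro line pl _
  unfold Spec_splitEachRow splitEachRow splitEachRow_alt
  rw [foldlA_eq, pvGoB_eq_lin]
  simp
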